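-- pv_equiv track=rewrite | github.com/sz128/few_shot_slot_tagging_and_NER | utils/metric_HIT.py | analysis_fscore
-- ===== SOURCE A (Python) =====
-- def analysis_fscore(pred_items, label_items):
--     """
--     pred_items: a set
--     label_items: a set
--     """
--     TP, FP, FN = 0, 0, 0
--     for pred_item in pred_items:
--         if pred_item in label_items:
--             TP += 1
--         else:
--             FP += 1
--     for label_item in label_items:
--         if label_item not in pred_items:
--             FN += 1
--     return TP, FP, FN
-- ===== SOURCE B (Python) =====
-- def analysis_fscore(pred_items, label_items):
--     """
--     pred_items: a set
--     label_items: a set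
--     """
--     P, L = set(pred_items), set(label_items)
--     return len(P & L), len(P - L), len(L - P)
-- ===== Notes on version B (the rewrite author's own statement) =====
-- stated objective: simpler
-- what changed: Replaces the two element-by-element counting loops with membership branches by three whole-set algebra expressions: TP = |P & L|, FP = |P - L|, FN = |L - P|; no loops or conditionals remain. Pre_ additionally requires duplicate-free lists on the Lean side, matching the documented set inputs.
import Mathlib
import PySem

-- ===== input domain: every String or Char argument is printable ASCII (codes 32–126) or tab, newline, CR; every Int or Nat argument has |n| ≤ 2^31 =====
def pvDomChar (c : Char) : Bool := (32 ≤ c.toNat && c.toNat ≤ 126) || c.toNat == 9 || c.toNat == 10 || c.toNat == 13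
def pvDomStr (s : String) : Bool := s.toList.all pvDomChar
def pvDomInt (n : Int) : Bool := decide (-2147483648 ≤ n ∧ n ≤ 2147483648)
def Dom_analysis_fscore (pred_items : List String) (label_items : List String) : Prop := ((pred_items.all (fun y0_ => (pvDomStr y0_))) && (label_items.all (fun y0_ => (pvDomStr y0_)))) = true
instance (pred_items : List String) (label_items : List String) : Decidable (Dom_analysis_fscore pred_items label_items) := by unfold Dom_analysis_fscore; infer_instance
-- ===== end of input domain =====

-- B replaces A's two counting loops by three whole-set algebra expressions (intersection and
-- differences), for simplicity; equivalence is claimed on duplicate-free inputs (the documented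
-- domain: both arguments are sets).

-- ===== PORT A =====
def analysis_fscore (pred_items : List String) (label_items : List String) : Int × Int × Int :=
  -- TP, FP, FN = 0, 0, 0; first loop updates TP/FP, second loop updates FN
  let tpfp : Int × Int :=
    pred_items.foldl
      (fun acc pred_item =>
        if label_items.contains pred_item then (acc.1 + 1, acc.2) else (acc.1, acc.2 + 1))
      (0, 0)
  let fn : Int :=
    label_items.foldl
      (fun acc label_item => if !(pred_items.contains label_item) then acc + 1 else acc)
      0
  (tpfp.1, tpfp.2, fn)

-- ===== PORT B =====
def analysis_fscore_alt (pred_items : List String) (label_items : List String) : Int × Int × Int :=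
  let P : PySem.Set String := PySem.Set.ofList pred_items
  let L : PySem.Set String := PySem.Set.ofList label_items
  (((PySem.Set.inter P L).length : Int),
   ((PySem.Set.diff P L).length : Int),
   ((PySem.Set.diff L P).length : Int))

-- ===== PRECONDITION & SPEC =====
-- The function is documented to take two sets; Pre_ excludes lists with duplicate elements, on
-- which A's per-occurrence counting (with multiplicity) and B's set-cardinality counting are both
-- defensible readings of an input the function never specifies.
def Pre_analysis_fscore (pred_items : List String) (label_items : List String) : Prop :=
  pred_items.Nodup ∧ label_items.Nodup
instance (pred_items : List String) (label_items : List String) : Decidable (Pre_analysis_fscore pred_items label_items) := by unfold Pre_analysis_fscore; infer_instance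

def pvWitness_analysis_fscore : List String × List String := (["a", "b", "c"], ["b", "d"])

def Spec_analysis_fscore (pred_items : List String) (label_items : List String) (out : Int × Int × Int) : Prop := out = analysis_fscore_alt pred_items label_items
instance (pred_items : List String) (label_items : List String) (out : Int × Int × Int) : Decidable (Spec_analysis_fscore pred_items label_items out) := by unfold Spec_analysis_fscore; infer_instance

-- ===== CLAIM (what is proved, stated in full; the proofs are below) =====
def Claim_equal_analysis_fscore : Prop := ∀ (pred_items : List String) (label_items : List String), Dom_analysis_fscore pred_items label_items → Pre_analysis_fscore pred_items label_items → Spec_analysis_fscore pred_items label_items (analysis_fscore pred_items label_items)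

-- ===== LEMMAS AND PROOFS =====

-- A's first loop computes the lengths of the two filters of pred_items by membership in label_items.
theorem foldl_tpfp (xs t : List String) (a b : Int) :
    xs.foldl
      (fun acc x => if t.contains x then (acc.1 + 1, acc.2) else (acc.1, acc.2 + 1))
      (a, b)
    = (a + ((xs.filter (fun x => t.contains x)).length : Int),
       b + ((xs.filter (fun x => !t.contains x)).length : Int)) := by
  induction xs generalizing a b with
  | nil => simp
  | cons x xs ih =>
    by_cases h : x ∈ t
    · rw [List.foldl_cons, if_pos (by simpa using h), ih, List.filter_cons, List.filter_cons,
        if_pos (by simpa using h), if_neg (by simpa using h)]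
      simp; omega
    · rw [List.foldl_cons, if_neg (by simpa using h), ih, List.filter_cons, List.filter_cons,
        if_neg (by simpa using h), if_pos (by simpa using h)]
      simp; omega

-- A's second loop computes the length of the non-members filter.
theorem foldl_fn (xs t : List String) (a : Int) :
    xs.foldl (fun acc x => if !(t.contains x) then acc + 1 else acc) a
    = a + ((xs.filter (fun x => !t.contains x)).length : Int) := by
  induction xs generalizing a with
  | nil => simp
  | cons x xs ih =>
    by_cases h : x ∈ t
    · rw [List.foldl_cons, if_neg (by simpa using h), ih, List.filter_cons,
        if_neg (by simpa using h)]
    · rw [List.foldl_cons, if_pos (by simpa using h), ih, List.filter_cons,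
        if_pos (by simpa using h)]
      simp; omega

-- ===== VERDICT (by name: the statement is the Claim_ definition above) =====
theorem analysis_fscore_spec : Claim_equal_analysis_fscore := by
  intro pred_items label_items _ hpre
  obtain ⟨hp, hl⟩ := hpre
  show analysis_fscore pred_items label_items = analysis_fscore_alt pred_items label_items
  have hB : analysis_fscore_alt pred_items label_items =
      (((pred_items.filter (fun x => label_items.contains x)).length : Int),
       ((pred_items.filter (fun x => !label_items.contains x)).length : Int),
       ((label_items.filter (fun x => !pred_items.contains x)).length : Int)) := by
    simp only [analysis_fscore_alt]
    rw [PySem.Set.ofList_eq_self_of_nodup _ hp, PySem.Set.ofList_eq_self_of_nodup _ hl]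
    -- Set.inter / Set.diff are definitionally the corresponding membership filters
    rfl
  rw [hB]
  simp only [analysis_fscore]
  rw [foldl_tpfp, foldl_fn]
  simp
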